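-- pv_equiv track=rewrite | github.com/FedericoFarina01/PROGRAMACION_1 | 02-Funciones/funciones_2.py | verificar_DNI
-- ===== SOURCE A (Python) =====
-- def verificar_DNI(dni:str)->bool:
--     valido = False
--     largo_dni = 0
--     for caracter in dni:
--         largo_dni += 1
--     if 6 <= largo_dni <= 8:
--         valido = True
--
--     return(valido)
-- ===== SOURCE B (Python) =====
-- def verificar_DNI(dni: str) -> bool:
--     return 6 <= len(dni) <= 8
-- ===== Notes on version B (the rewrite author's own statement) =====
-- stated objective: simpler
-- what changed: Replaced the manual character-counting loop and flag variable with a single chained comparison on len(dni).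
import Mathlib
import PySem

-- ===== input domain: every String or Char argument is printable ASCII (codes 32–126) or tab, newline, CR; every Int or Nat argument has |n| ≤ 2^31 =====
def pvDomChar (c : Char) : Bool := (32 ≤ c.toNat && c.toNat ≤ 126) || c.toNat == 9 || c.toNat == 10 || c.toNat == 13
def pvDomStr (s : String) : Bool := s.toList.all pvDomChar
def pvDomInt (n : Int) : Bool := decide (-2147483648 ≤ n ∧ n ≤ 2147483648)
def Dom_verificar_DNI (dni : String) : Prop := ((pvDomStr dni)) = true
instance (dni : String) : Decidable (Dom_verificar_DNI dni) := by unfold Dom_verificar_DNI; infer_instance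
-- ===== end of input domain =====

-- B replaces A's manual character-counting loop with a single chained comparison on the string length (objective: simpler).

-- ===== PORT A =====
def verificar_DNI (dni : String) : Bool :=
  let valido := false
  let largo_dni : Int := 0
  let largo_dni := dni.toList.foldl (fun acc _ => acc + 1) largo_dni
  let valido := if 6 ≤ largo_dni ∧ largo_dni ≤ 8 then true else valido
  valido

-- ===== PORT B =====
def verificar_DNI_alt (dni : String) : Bool :=
  decide (6 ≤ PySem.Str.len dni ∧ PySem.Str.len dni ≤ 8)

-- ===== PRECONDITION & SPEC =====
def Spec_verificar_DNI (dni : String) (out : Bool) : Prop := out = verificar_DNI_alt dni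
instance (dni : String) (out : Bool) : Decidable (Spec_verificar_DNI dni out) := by unfold Spec_verificar_DNI; infer_instance

-- ===== CLAIM (what is proved, stated in full; the proofs are below) =====
def Claim_equal_verificar_DNI : Prop := ∀ (dni : String), Dom_verificar_DNI dni → Spec_verificar_DNI dni (verificar_DNI dni)

-- ===== LEMMAS AND PROOFS =====

theorem foldl_count (l : List Char) (n : Int) :
    l.foldl (fun acc _ => acc + 1) n = n + l.length := by
  induction l generalizing n with
  | nil => simp
  | cons c t ih => simp [List.foldl, ih]; omega

-- ===== VERDICT (by name: the statement is the Claim_ definition above) =====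
theorem verificar_DNI_spec : Claim_equal_verificar_DNI := by
  intro dni _
  show verificar_DNI dni = verificar_DNI_alt dni
  unfold verificar_DNI verificar_DNI_alt
  simp only [foldl_count, zero_add, PySem.Str.len_eq]
  have e : dni.length = dni.toList.length := rfl
  by_cases h : 6 ≤ (dni.toList.length : Int) ∧ (dni.toList.length : Int) ≤ 8
  · rw [if_pos h]; symm; rw [decide_eq_true_eq]; omega
  · rw [if_neg h]; symm; rw [decide_eq_false_iff_not]; omega
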